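-- pv_equiv track=rewrite | github.com/tblock007/kattis | py/funhouse.py | findStart
-- ===== SOURCE A (Python) =====
-- def findStart(grid):
-- 	for i in range(len(grid)):
-- 		for j in range(len(grid[i])):
-- 			if grid[i][j] == '*':
-- 				if i == 0:
-- 					d = 'S'
-- 				elif i == len(grid) - 1:
-- 					d = 'N'
-- 				elif j == 0:
-- 					d = 'E'
-- 				elif j == len(grid[i]) - 1:
-- 					d = 'W'
-- 				return i, j, d
-- ===== SOURCE B (Python) =====
-- def findStart(grid):
--     n = len(grid)
--     if n == 0:
--         return None
--     j = grid[0].find('*')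
--     if j != -1:
--         return 0, j, 'S'
--     for i in range(1, n - 1):
--         row = grid[i]
--         if row:
--             if row[0] == '*':
--                 return i, 0, 'E'
--             if row[-1] == '*':
--                 return i, len(row) - 1, 'W'
--     if n > 1:
--         j = grid[n - 1].find('*')
--         if j != -1:
--             return n - 1, j, 'N'
--     return None
-- ===== Notes on version B (the rewrite author's own statement) =====
-- stated objective: faster
-- what changed: B visits only the border cells (str.find on the first and last row, first/last character of each middle row) instead of scanning every cell of every row, which is exact because A can only return at a star on the border (an interior first star makes A raise).
import Mathlib
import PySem

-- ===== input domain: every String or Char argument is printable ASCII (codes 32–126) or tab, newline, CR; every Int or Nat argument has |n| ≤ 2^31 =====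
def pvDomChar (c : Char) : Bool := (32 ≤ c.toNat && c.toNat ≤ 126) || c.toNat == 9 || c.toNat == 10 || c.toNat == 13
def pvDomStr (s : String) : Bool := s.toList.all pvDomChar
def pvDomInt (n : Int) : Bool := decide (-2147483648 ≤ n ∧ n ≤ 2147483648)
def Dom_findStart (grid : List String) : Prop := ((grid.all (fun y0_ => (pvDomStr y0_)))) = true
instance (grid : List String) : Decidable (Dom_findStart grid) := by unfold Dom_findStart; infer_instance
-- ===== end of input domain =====

-- B scans only the border cells (first row, first/last character of middle rows, last row)
-- instead of every grid cell — measured faster; A can only return at a star on the border.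

-- ===== PORT A =====
-- the direction decision at a found star; the final 'none' is Python's UnboundLocalError
-- (star not on any border), excluded by Pre_findStart
def aCell (i n j m : Nat) : Option (Int × Int × String) :=
  if i = 0 then some ((i : Int), (j : Int), "S")
  else if i = n - 1 then some ((i : Int), (j : Int), "N")
  else if j = 0 then some ((i : Int), (j : Int), "E")
  else if j = m - 1 then some ((i : Int), (j : Int), "W")
  else none

-- inner loop 'for j in range(len(grid[i]))'; outer 'some v' = return/raise happened with value v
def aRow (i n m : Nat) (cs : List Char) (j : Nat) : Option (Option (Int × Int × String)) :=
  match cs with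
  | [] => none
  | c :: rest => if c = '*' then some (aCell i n j m) else aRow i n m rest (j + 1)

-- outer loop 'for i in range(len(grid))'
def aRows (n : Nat) (rows : List String) (i : Nat) : Option (Int × Int × String) :=
  match rows with
  | [] => none
  | r :: rest =>
    match aRow i n r.toList.length r.toList 0 with
    | some v => v
    | none => aRows n rest (i + 1)

def findStart (grid : List String) : Option (Int × Int × String) :=
  aRows grid.length grid 0

-- ===== PORT B =====
-- loop 'for i in range(1, n-1)': look only at row[0] and row[-1] of each middle row
def bMid (rows : List String) (i : Nat) : Option (Int × Int × String) :=
  match rows with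
  | [] => none
  | r :: rest =>
    match r.toList with
    | [] => bMid rest (i + 1)
    | c :: cs' =>
      if c = '*' then some ((i : Int), 0, "E")
      else if (c :: cs').getLast (by simp) = '*' then
        some ((i : Int), (((c :: cs').length - 1 : Nat) : Int), "W")
      else bMid rest (i + 1)

def findStart_alt (grid : List String) : Option (Int × Int × String) :=
  let n := grid.length
  if n = 0 then none
  else
    let j := PySem.Str.find (grid.headD "") "*"
    if j ≠ -1 then some (0, j, "S")
    else
      match bMid ((grid.drop 1).take (n - 2)) 1 with
      | some v => some v
      | none =>
        if n > 1 then
          let j2 := PySem.Str.find (grid.getLastD "") "*"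
          if j2 ≠ -1 then some (((n - 1 : Nat) : Int), j2, "N")
          else none
        else none

-- ===== PRECONDITION & SPEC =====
-- Pre_ excludes exactly the grids whose first '*' in row-major order is an interior cell:
-- there Python A raises UnboundLocalError ('d' never assigned) instead of returning.
-- Closed form: every cell (i, j) holding '*' that is preceded by no '*' (all earlier rows
-- star-free, no earlier '*' in its own row) lies on the border of the grid.
def Pre_findStart (grid : List String) : Prop :=
  ∀ i : Fin grid.length, ∀ j : Fin ((grid.getD i.val "").toList.length),
    (grid.getD i.val "").toList.getD j.val ' ' = '*' →
    (∀ i' : Fin grid.length, i'.val < i.val → '*' ∉ (grid.getD i'.val "").toList) →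
    (∀ j' : Fin ((grid.getD i.val "").toList.length), j'.val < j.val →
        (grid.getD i.val "").toList.getD j'.val ' ' ≠ '*') →
    (i.val = 0 ∨ i.val = grid.length - 1 ∨ j.val = 0 ∨
      j.val = (grid.getD i.val "").toList.length - 1)
instance (grid : List String) : Decidable (Pre_findStart grid) := by
  unfold Pre_findStart; infer_instance

def pvWitness_findStart : List String := ["..*", "...", "..."]

def Spec_findStart (grid : List String) (out : Option (Int × Int × String)) : Prop :=
  out = findStart_alt grid
instance (grid : List String) (out : Option (Int × Int × String)) : Decidable (Spec_findStart grid out) := by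
  unfold Spec_findStart; infer_instance

-- ===== CLAIM (what is proved, stated in full; the proofs are below) =====
def Claim_equal_findStart : Prop :=
  ∀ (grid : List String), Dom_findStart grid → Pre_findStart grid →
    Spec_findStart grid (findStart grid)

-- ===== LEMMAS AND PROOFS =====

-- proof-side characterisation: index of the first '*' in a row
def firstIdx (cs : List Char) : Option Nat :=
  match cs with
  | [] => none
  | c :: rest => if c = '*' then some 0 else (firstIdx rest).map (· + 1)

-- proof-side: (row, column, row length) of the first '*' in row-major order
def rowsFirst (rows : List String) (i : Nat) : Option (Nat × Nat × Nat) :=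
  match rows with
  | [] => none
  | r :: rest =>
    match firstIdx r.toList with
    | some j => some (i, j, r.toList.length)
    | none => rowsFirst rest (i + 1)

theorem fi_none_iff (cs : List Char) : firstIdx cs = none ↔ '*' ∉ cs := by
  induction cs with
  | nil => simp [firstIdx]
  | cons c rest ih =>
    by_cases h : c = '*'
    · simp [firstIdx, h]
    · simp [firstIdx, h, Option.map_eq_none_iff, ih]
      exact fun _ hc => h hc.symm

theorem fi_some (cs : List Char) (k : Nat) (h : firstIdx cs = some k) :
    k < cs.length ∧ cs[k]? = some '*' ∧ ∀ i < k, cs[i]? ≠ some '*' := by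
  induction cs generalizing k with
  | nil => simp [firstIdx] at h
  | cons c rest ih =>
    by_cases hc : c = '*'
    · simp [firstIdx, hc] at h
      subst h; simp [hc]
    · simp [firstIdx, hc] at h
      obtain ⟨k', hk', rfl⟩ := h
      obtain ⟨h1, h2, h3⟩ := ih k' hk'
      refine ⟨by simp; omega, by simpa using h2, ?_⟩
      intro i hi
      cases i with
      | zero => simpa using fun hc' : c = '*' => hc hc'
      | succ i' => simpa using h3 i' (by omega)

theorem prefix_star (cs : List Char) (j : Nat) :
    ['*'] <+: cs.drop j ↔ cs[j]? = some '*' := by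
  constructor
  · rintro ⟨t, ht⟩
    have hj : j < cs.length := by
      by_contra hge
      rw [List.drop_eq_nil_of_le (by omega)] at ht
      simp at ht
    rw [List.drop_eq_getElem_cons hj, List.singleton_append] at ht
    injection ht with h1 h2
    simp [List.getElem?_eq_getElem hj, ← h1]
  · intro hc
    have hj : j < cs.length := by
      by_contra hge
      rw [List.getElem?_eq_none (by omega)] at hc
      simp at hc
    have hcv : cs[j] = '*' := by
      rw [List.getElem?_eq_getElem hj] at hc
      exact Option.some.inj hc
    refine ⟨cs.drop (j + 1), ?_⟩
    rw [List.drop_eq_getElem_cons hj, hcv]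
    rfl

theorem find_star (cs : List Char) :
    PySem.Chars.find cs ['*'] = (firstIdx cs).elim (-1) (fun k => (k : Int)) := by
  cases h : firstIdx cs with
  | none =>
    have hmem : '*' ∉ cs := (fi_none_iff cs).mp h
    have : ¬ ['*'] <:+: cs := fun hin => hmem ((List.singleton_infix_iff _ _).mp hin)
    simpa using (PySem.Chars.find_eq_neg_one_iff cs ['*']).mpr this
  | some k =>
    obtain ⟨hk, hget, hmin⟩ := fi_some cs k h
    have hinfix : ['*'] <:+: cs := (List.singleton_infix_iff _ _).mpr (by
      have := List.getElem?_eq_some_iff.mp hget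
      obtain ⟨h1, h2⟩ := this
      exact h2 ▸ List.getElem_mem h1)
    have hpos : 0 ≤ PySem.Chars.find cs ['*'] :=
      (PySem.Chars.find_nonneg_iff cs ['*']).mpr hinfix
    obtain ⟨hpre, hlt⟩ := PySem.Chars.find_spec (s := cs) (sub := ['*']) hpos
    set f := (PySem.Chars.find cs ['*']).toNat with hf
    have hfind : cs[f]? = some '*' := (prefix_star cs f).mp hpre
    have h1 : ¬ f < k := fun hc => hmin f hc hfind
    have h2 : ¬ k < f := fun hc => hlt k hc ((prefix_star cs k).mpr hget)
    have hfk : f = k := by omega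
    simp [← hfk, hf]
    omega

theorem aRow_eq (i n m : Nat) (cs : List Char) (j : Nat) :
    aRow i n m cs j = (firstIdx cs).map (fun k => aCell i n (j + k) m) := by
  induction cs generalizing j with
  | nil => simp [aRow, firstIdx]
  | cons c rest ih =>
    by_cases hc : c = '*'
    · simp [aRow, firstIdx, hc]
    · simp only [aRow, firstIdx, if_neg hc, ih]
      cases firstIdx rest with
      | none => simp
      | some k => simp [Nat.add_assoc, Nat.add_comm 1 k]

theorem aRows_eq (n : Nat) (rows : List String) (i : Nat) :
    aRows n rows i = (rowsFirst rows i).elim none (fun t => aCell t.1 n t.2.1 t.2.2) := by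
  induction rows generalizing i with
  | nil => simp [aRows, rowsFirst]
  | cons r rest ih =>
    cases h : firstIdx r.toList with
    | none => simp [aRows, rowsFirst, aRow_eq, h, ih]
    | some k => simp [aRows, rowsFirst, aRow_eq, h]

theorem rf_bounds (rows : List String) (i a j m : Nat)
    (h : rowsFirst rows i = some (a, j, m)) : i ≤ a ∧ a < i + rows.length := by
  induction rows generalizing i with
  | nil => simp [rowsFirst] at h
  | cons r rest ih =>
    cases hf : firstIdx r.toList with
    | some k =>
      simp [rowsFirst, hf] at h
      obtain ⟨h1, h2, h3⟩ := h
      simp; omega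
    | none =>
      simp [rowsFirst, hf] at h
      have := ih (i + 1) h
      simp; omega

theorem rf_append (xs ys : List String) (i : Nat) :
    rowsFirst (xs ++ ys) i = (rowsFirst xs i).elim (rowsFirst ys (i + xs.length)) some := by
  induction xs generalizing i with
  | nil => simp [rowsFirst]
  | cons r rest ih =>
    cases hf : firstIdx r.toList with
    | some k => simp [rowsFirst, hf]
    | none =>
      simp only [List.cons_append, rowsFirst, hf, ih]
      simp [Nat.add_assoc, Nat.add_comm 1]

theorem rf_char (rows : List String) (i a j m : Nat)
    (h : rowsFirst rows i = some (a, j, m)) :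
    i ≤ a ∧ ∃ r', rows[a - i]? = some r' ∧ firstIdx r'.toList = some j ∧
      m = r'.toList.length ∧
      ∀ k, k < a - i → ∀ r'', rows[k]? = some r'' → '*' ∉ r''.toList := by
  induction rows generalizing i with
  | nil => simp [rowsFirst] at h
  | cons r rest ih =>
    cases hf : firstIdx r.toList with
    | some k =>
      simp [rowsFirst, hf] at h
      obtain ⟨h1, h2, h3⟩ := h
      subst h1; subst h2; subst h3
      refine ⟨le_refl _, r, by simp, hf, rfl, ?_⟩
      intro k hk
      simp at hk
    | none =>
      have h' : rowsFirst rest (i + 1) = some (a, j, m) := by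
        rw [← h]; simp [rowsFirst, hf]
      obtain ⟨hle, r', hget, hfi, hm, hprior⟩ := ih (i + 1) h'
      refine ⟨by omega, r', ?_, hfi, hm, ?_⟩
      · have hd : a - i = (a - (i + 1)) + 1 := by omega
        rw [hd]; simpa using hget
      · intro k hk r'' hget''
        cases k with
        | zero =>
          simp at hget''
          subst hget''
          exact (fi_none_iff _).mp hf
        | succ k' =>
          apply hprior k' (by omega)
          simpa using hget''

theorem pre_use (grid : List String) (a j m : Nat) (hpre : Pre_findStart grid)
    (h : rowsFirst grid 0 = some (a, j, m)) :
    a = 0 ∨ a = grid.length - 1 ∨ j = 0 ∨ j = m - 1 := by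
  obtain ⟨-, r', hget, hfi, hm, hprior⟩ := rf_char grid 0 a j m h
  simp only [Nat.sub_zero] at hget hprior
  obtain ⟨hj1, hj2, hj3⟩ := fi_some _ _ hfi
  have hal : a < grid.length := (List.getElem?_eq_some_iff.mp hget).1
  have hgd : grid.getD a "" = r' := by
    simp [List.getD_eq_getElem?_getD, hget]
  have hres := hpre ⟨a, hal⟩ ⟨j, by rw [hgd]; exact hj1⟩
    (by
      show (grid.getD a "").toList.getD j ' ' = '*'
      rw [hgd, List.getD_eq_getElem?_getD, hj2]
      rfl)
    (by
      intro i' hi'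
      have hib : i'.val < grid.length := i'.isLt
      have := hprior i'.val hi' grid[i'.val] (List.getElem?_eq_getElem hib)
      rwa [List.getD_eq_getElem _ _ hib])
    (by
      intro j' hj'
      generalize hgen : (j' : Nat) = k at hj' ⊢
      have hkb : k < (grid.getD a "").toList.length := by
        rw [← hgen]; exact j'.isLt
      have hjb : k < r'.toList.length := by rwa [hgd] at hkb
      show (grid.getD a "").toList.getD k ' ' ≠ '*'
      rw [hgd, List.getD_eq_getElem _ _ hjb]
      intro hcontra
      exact hj3 k hj' (by rw [List.getElem?_eq_getElem hjb, hcontra]))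
  have hres' : a = 0 ∨ a = grid.length - 1 ∨ j = 0 ∨
      j = (grid.getD a "").toList.length - 1 := hres
  rw [hgd, ← hm] at hres'
  exact hres'

theorem mid_eq (rows : List String) (i n : Nat) (h1 : 1 ≤ i)
    (h2 : i + rows.length + 1 ≤ n)
    (hpre : ∀ a j m, rowsFirst rows i = some (a, j, m) → j = 0 ∨ j = m - 1) :
    aRows n rows i = bMid rows i := by
  induction rows generalizing i with
  | nil => simp [aRows, bMid]
  | cons r rest ih =>
    cases hf : firstIdx r.toList with
    | none =>
      have hmem : '*' ∉ r.toList := (fi_none_iff _).mp hf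
      have hrec : aRows n rest (i + 1) = bMid rest (i + 1) := by
        apply ih (i + 1) (by omega) (by simp at h2 ⊢; omega)
        intro a j m hm
        apply hpre a j m
        simp [rowsFirst, hf, hm]
      rcases hcs : r.toList with _ | ⟨c, cs'⟩
      · rw [hcs] at hf
        simpa [aRows, bMid, aRow_eq, hf, hcs] using hrec
      · rw [hcs] at hf
        have hcne : c ≠ '*' := fun hc => hmem (by simp [hcs, hc])
        have hlne : (c :: cs').getLast (by simp) ≠ '*' := fun hc => by
          have := List.getLast_mem (l := c :: cs') (by simp)
          rw [hc] at this; rw [hcs] at hmem; exact hmem this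
        simpa [aRows, bMid, aRow_eq, hf, hcs, hcne, hlne] using hrec
    | some k =>
      have hks : rowsFirst (r :: rest) i = some (i, k, r.toList.length) := by
        simp [rowsFirst, hf]
      have hkj : k = 0 ∨ k = r.toList.length - 1 := hpre i k r.toList.length hks
      obtain ⟨hk, hget, hmin⟩ := fi_some _ _ hf
      have hi0 : i ≠ 0 := by omega
      have hin : i ≠ n - 1 := by simp at h2; omega
      rcases hcs : r.toList with _ | ⟨c, cs'⟩
      · rw [hcs] at hk; simp at hk
      · rw [hcs] at hk hget hmin hf
        by_cases hk0 : k = 0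
        · have hc : c = '*' := by
            subst hk0; simpa using hget
          subst hc
          simp [aRows, bMid, aRow_eq, hf, hcs, aCell, hi0, hin, hk0]
        · have hc : c ≠ '*' := by
            intro hc
            exact hmin 0 (by omega) (by simp [hc])
          have hkl : k = (c :: cs').length - 1 := by
            rw [hcs] at hkj; omega
          have hlast : (c :: cs').getLast (by simp) = '*' := by
            have := List.getLast_eq_getElem (l := c :: cs') (by simp)
            rw [this]
            have : (c :: cs')[(c :: cs').length - 1]? = some '*' := by rw [← hkl]; exact hget
            simpa [List.getElem?_eq_getElem (show (c :: cs').length - 1 < (c :: cs').length by simp)] using this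
          have hkne : cs' ≠ [] := by
            rintro rfl
            simp at hkl
            exact hk0 hkl
          simp [aRows, bMid, aRow_eq, hf, hcs, hc, aCell, hi0, hin, hkl, hkne, hlast]

theorem findStart_spec : Claim_equal_findStart := by
  intro grid _ hpre
  unfold Spec_findStart
  have hstar : ("*" : String).toList = ['*'] := by decide
  cases grid with
  | nil => rfl
  | cons r rest =>
    rw [findStart, aRows_eq]
    cases h0 : firstIdx r.toList with
    | some k =>
      have hrf : rowsFirst (r :: rest) 0 = some (0, k, r.toList.length) := by
        simp [rowsFirst, h0]
      have hne : ((k : Nat) : Int) ≠ -1 := by omega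
      rw [hrf]
      simp [findStart_alt, hstar, find_star, h0, hne, aCell]
    | none =>
      have hrf : rowsFirst (r :: rest) 0 = rowsFirst rest 1 := by
        simp [rowsFirst, h0]
      have hfind : PySem.Chars.find r.toList ['*'] = -1 := by rw [find_star, h0]; rfl
      cases rest with
      | nil =>
        rw [hrf]
        simp [findStart_alt, hstar, hfind, rowsFirst, bMid]
      | cons r2 rest2 =>
        have hnn : (r2 :: rest2) ≠ [] := by simp
        have hsplit : r2 :: rest2 =
            (r2 :: rest2).dropLast ++ [(r2 :: rest2).getLast hnn] :=
          (List.dropLast_append_getLast hnn).symm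
        have hmlen : (r2 :: rest2).dropLast.length = rest2.length := by simp
        have hrf2 : rowsFirst (r2 :: rest2) 1 =
            ((rowsFirst (r2 :: rest2).dropLast 1).elim
              (rowsFirst [(r2 :: rest2).getLast hnn] (1 + (r2 :: rest2).dropLast.length)) some) := by
          conv_lhs => rw [hsplit]
          rw [rf_append]
        set n := (r :: r2 :: rest2).length with hn
        have hnval : n = rest2.length + 2 := by simp [hn]
        have hmid : List.take rest2.length (r2 :: rest2) = (r2 :: rest2).dropLast := by
          rw [List.dropLast_eq_take]
          simp
        cases hm : rowsFirst (r2 :: rest2).dropLast 1 with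
        | some t =>
          obtain ⟨a, j, m⟩ := t
          obtain ⟨hb1, hb2⟩ := rf_bounds _ _ _ _ _ hm
          have hgrf : rowsFirst (r :: r2 :: rest2) 0 = some (a, j, m) := by
            rw [hrf, hrf2, hm]; rfl
          rw [hgrf]
          have ha0 : a ≠ 0 := by omega
          have han : a ≠ n - 1 := by rw [hmlen] at hb2; omega
          have hj : j = 0 ∨ j = m - 1 := by
            rcases pre_use _ _ _ _ hpre hgrf with h | h | h | h
            · exact absurd h ha0
            · exact absurd h han
            · exact Or.inl h
            · exact Or.inr h
          have hmide : aRows n (r2 :: rest2).dropLast 1 = bMid (r2 :: rest2).dropLast 1 := by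
            apply mid_eq _ _ _ (by omega) (by rw [hmlen]; omega)
            intro a' j' m' hm'
            rw [hm] at hm'
            simp at hm'
            obtain ⟨h1, h2, h3⟩ := hm'
            subst h1; subst h2; subst h3
            exact hj
          have hbm : bMid (r2 :: rest2).dropLast 1 = aCell a n j m := by
            rw [← hmide, aRows_eq, hm]
            simp
          have hsome : ∃ v, aCell a n j m = some v := by
            by_cases hj0 : j = 0
            · refine ⟨((a : Int), (0 : Int), "E"), ?_⟩
              simp [aCell, ha0, han, hj0]
            · have hjm : j = m - 1 := by tauto
              have hm1 : m - 1 ≠ 0 := by omega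
              refine ⟨((a : Int), (((m - 1 : Nat)) : Int), "W"), ?_⟩
              simp [aCell, ha0, han, hjm, hm1]
          obtain ⟨v, hv⟩ := hsome
          simp [findStart_alt, hstar, hfind, hmid, hbm, hv]
        | none =>
          have hbmn : bMid (r2 :: rest2).dropLast 1 = none := by
            rw [← mid_eq _ _ n (by omega) (by rw [hmlen]; omega)
              (by intro a' j' m' hm'; rw [hm] at hm'; exact absurd hm' (by simp)),
              aRows_eq, hm]
            rfl
          have hlst : (r2 :: rest2).getLast?.getD "" = (r2 :: rest2).getLast hnn := by
            rw [List.getLast?_eq_some_getLast hnn]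
            rfl
          have hgrf : rowsFirst (r :: r2 :: rest2) 0 =
              rowsFirst [(r2 :: rest2).getLast hnn] (1 + (r2 :: rest2).dropLast.length) := by
            rw [hrf, hrf2, hm]; rfl
          have hidx : 1 + (r2 :: rest2).dropLast.length = n - 1 := by rw [hmlen]; omega
          cases hl : firstIdx ((r2 :: rest2).getLast hnn).toList with
          | some j =>
            have hgrf2 : rowsFirst (r :: r2 :: rest2) 0 =
                some (n - 1, j, ((r2 :: rest2).getLast hnn).toList.length) := by
              rw [hgrf, hidx]; simp [rowsFirst, hl]
            rw [hgrf2]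
            have hne : ((j : Nat) : Int) ≠ -1 := by omega
            
            simp [findStart_alt, hstar, hfind, hmid, hbmn, hlst, find_star, hl, hne,
              aCell, hnval]
          | none =>
            have hgrf2 : rowsFirst (r :: r2 :: rest2) 0 = none := by
              rw [hgrf]; simp [rowsFirst, hl]
            rw [hgrf2]
            simp [findStart_alt, hstar, hfind, hmid, hbmn, hlst, find_star, hl]
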